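-- pv_equiv track=rewrite | github.com/miliar/Code_Jam_Webscraper | solutions_python/Problem_201/76.py | f
-- ===== SOURCE A (Python) =====
-- def f(n,k):
--     if k == 1:
--         return n-1
--     k -= 1
--     n -= 1
--
--     if k%2 == 1:
--         return f(n-n//2, k-k//2)
--     else:
--         return f(n//2, k//2)
-- ===== SOURCE B (Python) =====
-- def f(n, k):
--     # Iterative form of the same recurrence: the recursion is a tail call,
--     # so a while loop reproduces it exactly.
--     while k != 1:
--         k -= 1
--         n -= 1
--         if k % 2 == 1:
--             n, k = n - n // 2, k - k // 2
--         else: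
--             n, k = n // 2, k // 2
--     return n - 1
-- ===== Notes on version B (the rewrite author's own statement) =====
-- stated objective: simpler
-- what changed: The tail recursion is replaced by an iterative while-loop that updates (n, k) in place with the same branch order and floor divisions.
import Mathlib
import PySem

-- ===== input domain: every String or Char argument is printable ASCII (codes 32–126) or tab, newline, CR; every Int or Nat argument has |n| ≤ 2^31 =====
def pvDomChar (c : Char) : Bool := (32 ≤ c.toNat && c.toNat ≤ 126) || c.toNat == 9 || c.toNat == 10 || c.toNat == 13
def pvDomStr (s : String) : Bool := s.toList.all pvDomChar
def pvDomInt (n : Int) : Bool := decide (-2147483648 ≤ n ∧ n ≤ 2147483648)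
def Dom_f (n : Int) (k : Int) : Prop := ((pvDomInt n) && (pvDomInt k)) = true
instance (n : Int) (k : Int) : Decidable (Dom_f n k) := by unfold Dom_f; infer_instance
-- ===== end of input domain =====

-- B replaces the tail recursion by an iterative while-loop over the same state (objective: simpler).

-- ===== PORT A =====
-- A's recursion: fuel = k.toNat + 1 suffices because k strictly decreases while staying ≥ 1.
def fAux : Nat → Int → Int → Int
  | 0, _, _ => 0
  | fuel+1, n, k =>
    if k == 1 then n - 1
    else
      let k' := k - 1
      let n' := n - 1
      if PySem.Int.mod k' 2 == 1 then
        fAux fuel (n' - PySem.Int.floordiv n' 2) (k' - PySem.Int.floordiv k' 2)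
      else
        fAux fuel (PySem.Int.floordiv n' 2) (PySem.Int.floordiv k' 2)

def f (n : Int) (k : Int) : Int := fAux (k.toNat + 1) n k

-- ===== PORT B =====
-- one iteration of B's while-loop body
def loopStep (n : Int) (k : Int) : Int × Int :=
  let k' := k - 1
  let n' := n - 1
  if PySem.Int.mod k' 2 == 1 then
    (n' - PySem.Int.floordiv n' 2, k' - PySem.Int.floordiv k' 2)
  else
    (PySem.Int.floordiv n' 2, PySem.Int.floordiv k' 2)

-- B's while-loop over the state (n, k), with the same sufficient fuel
def loopAux : Nat → Int → Int → Int × Int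
  | 0, n, k => (n, k)
  | fuel+1, n, k =>
    if k == 1 then (n, k)
    else
      let s := loopStep n k
      loopAux fuel s.1 s.2

def f_alt (n : Int) (k : Int) : Int := (loopAux (k.toNat + 1) n k).1 - 1

-- ===== PRECONDITION & SPEC =====
-- Pre_f excludes k ≤ 0, on which A never reaches its base case and raises RecursionError.
def Pre_f (n : Int) (k : Int) : Prop := 1 ≤ k
instance (n : Int) (k : Int) : Decidable (Pre_f n k) := by unfold Pre_f; infer_instance
def pvWitness_f : Int × Int := (10, 4)

def Spec_f (n : Int) (k : Int) (out : Int) : Prop := out = f_alt n k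
instance (n : Int) (k : Int) (out : Int) : Decidable (Spec_f n k out) := by unfold Spec_f; infer_instance

-- ===== CLAIM =====
def Claim_equal_f : Prop := ∀ (n : Int) (k : Int), Dom_f n k → Pre_f n k → Spec_f n k (f n k)

-- ===== LEMMAS AND PROOFS =====

-- the loop step keeps k ≥ 1 and strictly decreases it (for k ≥ 2)
lemma loopStep_k_bounds (n k : Int) (hk : 2 ≤ k) :
    1 ≤ (loopStep n k).2 ∧ (loopStep n k).2 ≤ k - 1 := by
  have h2 : (0:Int) < 2 := by omega
  by_cases hm : (PySem.Int.mod (k - 1) 2 == 1) = true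
  · have hm' : (k - 1) % 2 = 1 := by
      have := hm
      rw [PySem.Int.mod_eq_emod_of_pos h2] at this
      simpa using this
    simp only [loopStep, if_pos hm, PySem.Int.floordiv_eq_ediv_of_pos h2]
    omega
  · have hm' : (k - 1) % 2 ≠ 1 := by
      intro h
      exact hm (by rw [PySem.Int.mod_eq_emod_of_pos h2]; simpa using h)
    simp only [loopStep, if_neg hm, PySem.Int.floordiv_eq_ediv_of_pos h2]
    omega

lemma fAux_eq_loopAux (fuel : Nat) : ∀ (n k : Int), 1 ≤ k → k.toNat ≤ fuel →
    fAux fuel n k = (loopAux fuel n k).1 - 1 := by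
  induction fuel with
  | zero => intro n k hk hf; omega
  | succ fuel ih =>
    intro n k hk hf
    by_cases h1 : k = 1
    · subst h1; simp [fAux, loopAux]
    · have hk2 : 2 ≤ k := by omega
      have hb := loopStep_k_bounds n k hk2
      have hbeq : (k == 1) = false := by simp [h1]
      have hstep : fAux (fuel+1) n k = fAux fuel (loopStep n k).1 (loopStep n k).2 := by
        by_cases hm : (PySem.Int.mod (k - 1) 2 == 1) = true
        · simp only [fAux, hbeq, loopStep, Bool.false_eq_true, if_false, if_pos hm]
        · simp only [fAux, hbeq, loopStep, Bool.false_eq_true, if_false, if_neg hm]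
      rw [hstep]
      have hloop : loopAux (fuel+1) n k = loopAux fuel (loopStep n k).1 (loopStep n k).2 := by
        simp only [loopAux, hbeq, Bool.false_eq_true, if_false]
      rw [hloop]
      exact ih _ _ hb.1 (by omega)

-- ===== VERDICT =====
theorem f_spec : Claim_equal_f := by
  intro n k _ hk
  unfold Spec_f f f_alt
  exact fAux_eq_loopAux (k.toNat + 1) n k hk (by omega)
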